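-- pv_equiv track=rewrite | github.com/moinonin/pipeline_defi | simodash/simo2.py | count_consecutive_jumps
-- ===== SOURCE A (Python) =====
-- def count_consecutive_jumps(c_values):
--     """
--     Counts longest streaks of consecutive positive and negative jumps.
--
--     :param c_values: List of c(t) values
--     :return: Longest consecutive positive and negative jumps
--     """
--     jumps = [c_values[i] - c_values[i-1] for i in range(1, len(c_values))]
--
--     longest_pos, longest_neg = 0, 0
--     current_pos, current_neg = 0, 0
--
--     for jump in jumps:
--         if jump > 0:
--             current_pos += 1
--             current_neg = 0
--         elif jump < 0:
--             current_neg += 1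
--             current_pos = 0
--         else:
--             current_pos, current_neg = 0, 0
--
--         longest_pos = max(longest_pos, current_pos)
--         longest_neg = max(longest_neg, current_neg)
--
--     return longest_pos, longest_neg
-- ===== SOURCE B (Python) =====
-- def count_consecutive_jumps(c_values):
--     """
--     Counts longest streaks of consecutive positive and negative jumps.
--
--     Run-length-encoding approach: take the sign of each consecutive
--     difference, split the sign list into maximal same-sign runs, and take
--     the longest positive-sign and negative-sign run lengths.
--     """
--     signs = [(c_values[i] > c_values[i - 1]) - (c_values[i] < c_values[i - 1])
--              for i in range(1, len(c_values))]
--     runs = []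
--     i, n = 0, len(signs)
--     while i < n:
--         j = i + 1
--         while j < n and signs[j] == signs[i]:
--             j += 1
--         runs.append((signs[i], j - i))
--         i = j
--     longest_pos = max((length for sign, length in runs if sign == 1), default=0)
--     longest_neg = max((length for sign, length in runs if sign == -1), default=0)
--     return longest_pos, longest_neg
-- ===== Notes on version B (the rewrite author's own statement) =====
-- stated objective: alternative
-- what changed: A keeps four running counters (current/longest positive and negative streaks) updated element-by-element; B run-length-encodes the sign list into maximal same-sign runs and takes the longest run length per sign with max(..., default=0).
import Mathlib
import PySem

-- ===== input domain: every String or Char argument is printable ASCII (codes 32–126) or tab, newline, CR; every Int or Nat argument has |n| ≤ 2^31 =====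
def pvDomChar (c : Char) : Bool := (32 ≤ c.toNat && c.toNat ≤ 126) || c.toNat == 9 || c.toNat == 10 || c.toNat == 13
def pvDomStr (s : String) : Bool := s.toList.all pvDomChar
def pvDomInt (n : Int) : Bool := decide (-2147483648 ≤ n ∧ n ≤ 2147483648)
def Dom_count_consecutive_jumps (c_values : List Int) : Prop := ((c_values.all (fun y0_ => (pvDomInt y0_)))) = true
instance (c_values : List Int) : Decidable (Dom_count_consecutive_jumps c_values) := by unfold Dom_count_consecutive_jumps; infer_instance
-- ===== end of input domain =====

-- B replaces A's four-counter single pass by a run-length encoding of the sign list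
-- (split into maximal same-sign runs, then take the longest positive/negative run); objective: alternative.

-- ===== PORT A =====
def pvStepA (st : Int × Int × Int × Int) (jump : Int) : Int × Int × Int × Int :=
  let cur : Int × Int :=
    if jump > 0 then (st.2.2.1 + 1, 0)
    else if jump < 0 then (0, st.2.2.2 + 1)
    else (0, 0)
  (max st.1 cur.1, max st.2.1 cur.2, cur.1, cur.2)

def count_consecutive_jumps (c_values : List Int) : Int × Int :=
  let jumps := (PySem.List.pyRange 1 (c_values.length : Int) 1).map
    (fun i => PySem.List.pyGetD c_values i 0 - PySem.List.pyGetD c_values (i - 1) 0)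
  let st := jumps.foldl pvStepA (0, 0, 0, 0)
  (st.1, st.2.1)

-- ===== PORT B =====
def pvSigns (c_values : List Int) : List Int :=
  (PySem.List.pyRange 1 (c_values.length : Int) 1).map
    (fun i =>
      (if PySem.List.pyGetD c_values i 0 > PySem.List.pyGetD c_values (i - 1) 0 then (1 : Int) else 0)
      - (if PySem.List.pyGetD c_values i 0 < PySem.List.pyGetD c_values (i - 1) 0 then (1 : Int) else 0))

-- the inner while loop of Source B: peel off the maximal run of the current sign
def pvRuns : List Int → List (Int × Int)
  | [] => []
  | s :: t =>
      (s, ((t.takeWhile (fun x => x == s)).length : Int) + 1) :: pvRuns (t.dropWhile (fun x => x == s))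
  termination_by l => l.length
  decreasing_by
    simp only [List.length_cons]
    exact Nat.lt_succ_of_le (List.length_dropWhile_le _ _)

def count_consecutive_jumps_alt (c_values : List Int) : Int × Int :=
  let runs := pvRuns (pvSigns c_values)
  (PySem.List.maxD ((runs.filter (fun p => p.1 == 1)).map (fun p => p.2)) (fun x => x) 0,
   PySem.List.maxD ((runs.filter (fun p => p.1 == -1)).map (fun p => p.2)) (fun x => x) 0)

-- ===== PRECONDITION & SPEC =====
def Spec_count_consecutive_jumps (c_values : List Int) (out : Int × Int) : Prop := out = count_consecutive_jumps_alt c_values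
instance (c_values : List Int) (out : Int × Int) : Decidable (Spec_count_consecutive_jumps c_values out) := by unfold Spec_count_consecutive_jumps; infer_instance

-- ===== CLAIM (what is proved, stated in full; the proofs are below) =====
def Claim_equal_count_consecutive_jumps : Prop := ∀ (c_values : List Int), Dom_count_consecutive_jumps c_values → Spec_count_consecutive_jumps c_values (count_consecutive_jumps c_values)

-- ===== LEMMAS AND PROOFS =====

-- longest run length with a given sign key, as Source B computes it
def pvBest (key : Int) (rs : List (Int × Int)) : Int :=
  PySem.List.maxD ((rs.filter (fun p => p.1 == key)).map (fun p => p.2)) (fun x => x) 0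

theorem foldl_max_shift (x y : Int) (ys : List Int) :
    List.foldl max (max x y) ys = max x (List.foldl max y ys) := by
  induction ys generalizing y with
  | nil => rfl
  | cons z ys ih => simp only [List.foldl_cons, max_assoc, ih]

theorem maxD_cons_int (x : Int) (t : List Int) (hx : 0 ≤ x) :
    PySem.List.maxD (x :: t) (fun v => v) 0 = max x (PySem.List.maxD t (fun v => v) 0) := by
  cases t with
  | nil => simp [PySem.List.maxD, PySem.List.max?]; omega
  | cons y ys =>
    simp [PySem.List.maxD, PySem.List.max?_id_cons, List.foldl_cons]
    rw [foldl_max_shift]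

theorem maxD_nonneg_int (t : List Int) (ht : ∀ y ∈ t, 0 ≤ y) :
    0 ≤ PySem.List.maxD t (fun v => v) 0 := by
  cases t with
  | nil => simp [PySem.List.maxD, PySem.List.max?]
  | cons y ys =>
    rw [maxD_cons_int y ys (ht y (by simp))]
    exact le_max_of_le_left (ht y (by simp))

theorem pvBest_nonneg (key : Int) (rs : List (Int × Int)) (hrs : ∀ p ∈ rs, 0 ≤ p.2) :
    0 ≤ pvBest key rs := by
  apply maxD_nonneg_int
  intro y hy
  obtain ⟨p, hp, rfl⟩ := List.mem_map.mp hy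
  exact hrs p (List.mem_of_mem_filter hp)

theorem pvBest_cons (key s k : Int) (rs : List (Int × Int)) (hk : 0 ≤ k) :
    pvBest key ((s, k) :: rs) = if s = key then max k (pvBest key rs) else pvBest key rs := by
  unfold pvBest
  by_cases hs : s = key
  · subst hs
    simp only [List.filter_cons, beq_self_eq_true, ite_true, List.map_cons]
    rw [maxD_cons_int k _ hk]
  · simp [hs]

theorem pvRuns_snd_pos : ∀ (l : List Int), ∀ p ∈ pvRuns l, 0 ≤ p.2 := by
  intro l
  induction l using pvRuns.induct with
  | case1 => simp [pvRuns]
  | case2 s t ih =>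
    intro p hp
    rw [pvRuns] at hp
    rcases List.mem_cons.mp hp with h | h
    · subst h; positivity
    · exact ih p h

theorem head?_dropWhile {α : Type} (p : α → Bool) (l : List α) (a : α)
    (h : (l.dropWhile p).head? = some a) : p a = false := by
  induction l with
  | nil => simp [List.dropWhile] at h
  | cons x xs ih =>
    rw [List.dropWhile_cons] at h
    by_cases hx : p x = true
    · exact ih (by simpa [hx] using h)
    · simp [hx] at h; subst h; simpa using hx

theorem signs_mem (c : List Int) : ∀ x ∈ pvSigns c, x = 1 ∨ x = -1 ∨ x = 0 := by
  intro x hx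
  obtain ⟨i, _, rfl⟩ := List.mem_map.mp hx
  split_ifs <;> omega

-- A's step sees only the trichotomy of the jump, which the sign preserves
theorem step_sign (st : Int × Int × Int × Int) (a b : Int) :
    pvStepA st (b - a) = pvStepA st ((if b > a then (1 : Int) else 0) - (if b < a then (1 : Int) else 0)) := by
  unfold pvStepA
  rcases lt_trichotomy a b with h | h | h <;>
    simp only [] <;> split_ifs <;> first | rfl | omega

theorem fold_jumps_eq_fold_signs (c : List Int) :
    ((PySem.List.pyRange 1 (c.length : Int) 1).map
      (fun i => PySem.List.pyGetD c i 0 - PySem.List.pyGetD c (i - 1) 0)).foldl pvStepA (0, 0, 0, 0)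
    = (pvSigns c).foldl pvStepA (0, 0, 0, 0) := by
  unfold pvSigns
  rw [List.foldl_map, List.foldl_map]
  apply PySem.List.foldl_congr_mem
  intro st x _
  exact step_sign st _ _

-- run lemmas: folding A's step over a whole constant-sign run
theorem runPos (l : List Int) (lp ln cp cn : Int) (hl : ∀ x ∈ l, x = 1) (hln : 0 ≤ ln) :
    List.foldl pvStepA (lp, ln, cp, cn) (1 :: l)
      = (max lp (cp + l.length + 1), ln, cp + l.length + 1, 0) := by
  induction l generalizing lp cp cn with
  | nil =>
    simp [pvStepA]
    omega
  | cons a t ih =>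
    have ha : a = 1 := hl a (by simp)
    subst ha
    have h1 : List.foldl pvStepA (lp, ln, cp, cn) (1 :: 1 :: t)
        = List.foldl pvStepA (max lp (cp + 1), ln, cp + 1, 0) (1 :: t) := by
      simp [pvStepA, max_eq_left hln]
    rw [h1, ih (max lp (cp + 1)) (cp + 1) 0 (fun x hx => hl x (by simp [hx]))]
    simp [List.length_cons]
    constructor
    · omega
    · omega

theorem runNeg (l : List Int) (lp ln cp cn : Int) (hl : ∀ x ∈ l, x = -1) (hlp : 0 ≤ lp) :
    List.foldl pvStepA (lp, ln, cp, cn) ((-1) :: l)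
      = (lp, max ln (cn + l.length + 1), 0, cn + l.length + 1) := by
  induction l generalizing ln cp cn with
  | nil =>
    simp [pvStepA]
    omega
  | cons a t ih =>
    have ha : a = -1 := hl a (by simp)
    subst ha
    have h1 : List.foldl pvStepA (lp, ln, cp, cn) ((-1) :: (-1) :: t)
        = List.foldl pvStepA (lp, max ln (cn + 1), 0, cn + 1) ((-1) :: t) := by
      simp [pvStepA, max_eq_left hlp]
    rw [h1, ih (max ln (cn + 1)) 0 (cn + 1) (fun x hx => hl x (by simp [hx]))]
    simp [List.length_cons]
    omega

theorem runZero (l : List Int) (lp ln cp cn : Int) (hl : ∀ x ∈ l, x = 0) (hlp : 0 ≤ lp)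
    (hln : 0 ≤ ln) :
    List.foldl pvStepA (lp, ln, cp, cn) (0 :: l) = (lp, ln, 0, 0) := by
  induction l generalizing cp cn with
  | nil => simp [pvStepA]; omega
  | cons a t ih =>
    have ha : a = 0 := hl a (by simp)
    subst ha
    have h1 : List.foldl pvStepA (lp, ln, cp, cn) (0 :: 0 :: t)
        = List.foldl pvStepA (lp, ln, 0, 0) (0 :: t) := by
      simp [pvStepA, max_eq_left hlp, max_eq_left hln]
    rw [h1, ih 0 0 (fun x hx => hl x (by simp [hx]))]

-- main invariant: A's fold over the sign list computes the longest run lengths of pvRuns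
theorem mainInv : ∀ (signs : List Int),
    ∀ (lp ln cp cn : Int),
    (∀ x ∈ signs, x = 1 ∨ x = -1 ∨ x = 0) →
    0 ≤ lp → 0 ≤ ln → 0 ≤ cp → 0 ≤ cn →
    (signs.head? = some 1 → cp = 0) → (signs.head? = some (-1) → cn = 0) →
    (List.foldl pvStepA (lp, ln, cp, cn) signs).1 = max lp (pvBest 1 (pvRuns signs)) ∧
    (List.foldl pvStepA (lp, ln, cp, cn) signs).2.1 = max ln (pvBest (-1) (pvRuns signs)) := by
  intro signs
  induction signs using pvRuns.induct with
  | case1 =>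
    intro lp ln cp cn _ hlp hln _ _ _ _
    simp [pvRuns, pvBest, PySem.List.maxD, PySem.List.max?]
    omega
  | case2 s t ih =>
    intro lp ln cp cn hmem hlp hln hcp hcn hhp hhn
    set r1 := t.takeWhile (fun x => x == s) with hr1def
    set rest := t.dropWhile (fun x => x == s) with hrestdef
    have hsplit : s :: t = (s :: r1) ++ rest := by
      rw [List.cons_append, hr1def, hrestdef, List.takeWhile_append_dropWhile]
    have hr1 : ∀ x ∈ r1, x = s := by
      intro x hx
      have := List.mem_takeWhile_imp hx
      simpa using this
    have hrest_sub : rest.Sublist t := List.dropWhile_sublist _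
    have hmem_rest : ∀ x ∈ rest, x = 1 ∨ x = -1 ∨ x = 0 :=
      fun x hx => hmem x (List.mem_cons_of_mem s (hrest_sub.mem hx))
    have hruns : pvRuns (s :: t) = (s, ((r1.length : Int) + 1)) :: pvRuns rest := by
      rw [pvRuns]
    have hK : (0 : Int) ≤ (r1.length : Int) + 1 := by positivity
    have hposrest := pvRuns_snd_pos rest
    rcases hmem s (by simp) with hs | hs | hs
    · -- s = 1
      subst hs
      have hcp0 : cp = 0 := hhp rfl
      subst hcp0
      have hfold : List.foldl pvStepA (lp, ln, 0, cn) (1 :: t)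
          = List.foldl pvStepA (max lp ((0 : Int) + (r1.length : Int) + 1), ln,
              (0 : Int) + (r1.length : Int) + 1, 0) rest := by
        rw [hsplit, List.foldl_append, runPos r1 lp ln 0 cn hr1 hln]
      rw [hfold]
      have hhead1 : rest.head? = some 1 → (0 : Int) + (r1.length : Int) + 1 = 0 := by
        intro h
        have := head?_dropWhile _ t 1 (hrestdef ▸ h)
        simp at this
      have := ih (max lp ((0 : Int) + (r1.length : Int) + 1)) ln
        ((0 : Int) + (r1.length : Int) + 1) 0 hmem_rest (by positivity) hln (by positivity)
        le_rfl hhead1 (fun _ => rfl)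
      refine ⟨?_, ?_⟩
      · rw [this.1, hruns, pvBest_cons 1 1 _ _ hK]
        simp only [ite_true]
        have h0 : (0 : Int) + (r1.length : Int) + 1 = (r1.length : Int) + 1 := by ring
        rw [h0, max_assoc]
      · rw [this.2, hruns, pvBest_cons (-1) 1 _ _ hK]
        norm_num
    · -- s = -1
      subst hs
      have hcn0 : cn = 0 := hhn rfl
      subst hcn0
      have hfold : List.foldl pvStepA (lp, ln, cp, 0) ((-1) :: t)
          = List.foldl pvStepA (lp, max ln ((0 : Int) + (r1.length : Int) + 1), 0,
              (0 : Int) + (r1.length : Int) + 1) rest := by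
        rw [hsplit, List.foldl_append, runNeg r1 lp ln cp 0 hr1 hlp]
      rw [hfold]
      have hheadn : rest.head? = some (-1) → (0 : Int) + (r1.length : Int) + 1 = 0 := by
        intro h
        have := head?_dropWhile _ t (-1) (hrestdef ▸ h)
        simp at this
      have := ih lp (max ln ((0 : Int) + (r1.length : Int) + 1)) 0
        ((0 : Int) + (r1.length : Int) + 1) hmem_rest hlp (by positivity) le_rfl
        (by positivity) (fun _ => rfl) hheadn
      refine ⟨?_, ?_⟩
      · rw [this.1, hruns, pvBest_cons 1 (-1) _ _ hK]
        norm_num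
      · rw [this.2, hruns, pvBest_cons (-1) (-1) _ _ hK]
        simp only [ite_true]
        have h0 : (0 : Int) + (r1.length : Int) + 1 = (r1.length : Int) + 1 := by ring
        rw [h0, max_assoc]
    · -- s = 0
      subst hs
      have hfold : List.foldl pvStepA (lp, ln, cp, cn) (0 :: t)
          = List.foldl pvStepA (lp, ln, 0, 0) rest := by
        rw [hsplit, List.foldl_append, runZero r1 lp ln cp cn hr1 hlp hln]
      rw [hfold]
      have := ih lp ln 0 0 hmem_rest hlp hln le_rfl le_rfl (fun _ => rfl) (fun _ => rfl)
      refine ⟨?_, ?_⟩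
      · rw [this.1, hruns, pvBest_cons 1 0 _ _ hK]
        norm_num
      · rw [this.2, hruns, pvBest_cons (-1) 0 _ _ hK]
        norm_num

-- ===== VERDICT (by name: the statement is the Claim_ definition above) =====
theorem count_consecutive_jumps_spec : Claim_equal_count_consecutive_jumps := by
  intro c _
  unfold Spec_count_consecutive_jumps count_consecutive_jumps count_consecutive_jumps_alt
  simp only []
  rw [fold_jumps_eq_fold_signs]
  have h := mainInv (pvSigns c) 0 0 0 0 (signs_mem c) le_rfl le_rfl le_rfl le_rfl
    (fun _ => rfl) (fun _ => rfl)
  have hp := pvRuns_snd_pos (pvSigns c)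
  have h1 : max (0 : Int) (pvBest 1 (pvRuns (pvSigns c))) = pvBest 1 (pvRuns (pvSigns c)) :=
    max_eq_right (pvBest_nonneg _ _ hp)
  have h2 : max (0 : Int) (pvBest (-1) (pvRuns (pvSigns c))) = pvBest (-1) (pvRuns (pvSigns c)) :=
    max_eq_right (pvBest_nonneg _ _ hp)
  exact Prod.ext (by rw [h.1, h1]; rfl) (by rw [h.2, h2]; rfl)
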